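-- pv_equiv track=rewrite | github.com/gloridas75/ngrsserver08 | context/engine/pattern_validator.py | validate_work_pattern
-- ===== SOURCE A (Python) =====
-- from typing import Dict, List, Tuple
--
-- def validate_work_pattern(pattern: List[str], shift_details: dict, scheme: str) -> Tuple[bool, List[str]]:
--     """
--     Validate work pattern for critical structural issues only.
--
--     Args:
--         pattern: List of shift codes (e.g., ['D','D','D','O'])
--         shift_details: Shift timing information (not used in relaxed validation)
--         scheme: Employment scheme (SchemeA, SchemeB, SchemeP)
--
--     Returns:
--         Tuple of (is_valid, list_of_violations)
--     """
--     violations = []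
--
--     # Check 1: Empty pattern
--     if not pattern or len(pattern) == 0:
--         violations.append("❌ Pattern is empty - must contain at least one shift code")
--         return False, violations
--
--     # Check 2: Excessive consecutive work days (>12 without 'O')
--     # Count consecutive work days without any 'O' in pattern
--     consecutive_work_days = 0
--     max_consecutive = 0
--
--     for code in pattern:
--         if code != 'O':
--             consecutive_work_days += 1
--             max_consecutive = max(max_consecutive, consecutive_work_days)
--         else:
--             consecutive_work_days = 0
--
--     if max_consecutive > 12:
--         violations.append(
--             f"❌ Pattern has {max_consecutive} consecutive work days without any 'O' (off-day). "
--             f"Maximum allowed: 12. Add 'O' to break the sequence."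
--         )
--         return False, violations
--
--     # Pattern passed critical checks
--     return True, []
-- ===== SOURCE B (Python) =====
-- from typing import Dict, List, Tuple
--
-- def validate_work_pattern(pattern: List[str], shift_details: dict, scheme: str) -> Tuple[bool, List[str]]:
--     violations = []
--
--     # Check 1: Empty pattern
--     if not pattern or len(pattern) == 0:
--         violations.append("❌ Pattern is empty - must contain at least one shift code")
--         return False, violations
--
--     # Check 2: longest stretch without 'O' = largest gap between consecutive
--     # 'O' positions (with sentinels -1 and len(pattern))
--     positions = [-1] + [i for i, code in enumerate(pattern) if code == 'O'] + [len(pattern)]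
--     max_consecutive = max(b - a - 1 for a, b in zip(positions, positions[1:]))
--
--     if max_consecutive > 12:
--         violations.append(
--             f"❌ Pattern has {max_consecutive} consecutive work days without any 'O' (off-day). "
--             f"Maximum allowed: 12. Add 'O' to break the sequence."
--         )
--         return False, violations
--
--     return True, []
-- ===== Notes on version B (the rewrite author's own statement) =====
-- stated objective: alternative
-- what changed: The running counter/max scan is replaced by collecting the indices of 'O' entries (with -1 and len(pattern) sentinels) and taking the largest gap between consecutive boundary positions.
import Mathlib
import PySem

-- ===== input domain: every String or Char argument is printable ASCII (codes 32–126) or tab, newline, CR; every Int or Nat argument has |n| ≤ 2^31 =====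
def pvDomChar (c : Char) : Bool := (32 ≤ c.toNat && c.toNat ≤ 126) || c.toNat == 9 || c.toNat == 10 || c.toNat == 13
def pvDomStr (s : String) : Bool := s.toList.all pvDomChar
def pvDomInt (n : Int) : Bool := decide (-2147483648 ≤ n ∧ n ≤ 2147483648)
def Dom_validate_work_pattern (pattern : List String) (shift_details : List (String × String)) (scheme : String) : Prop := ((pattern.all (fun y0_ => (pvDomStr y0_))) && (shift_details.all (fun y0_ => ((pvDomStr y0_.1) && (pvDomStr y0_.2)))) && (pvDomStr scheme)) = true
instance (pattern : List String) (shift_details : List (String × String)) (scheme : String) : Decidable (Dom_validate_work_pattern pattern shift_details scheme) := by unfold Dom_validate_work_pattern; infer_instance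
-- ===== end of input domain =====

-- ===== PORT A =====
-- B replaces A's running-counter scan by collecting 'O' boundary indices and taking the
-- largest gap between consecutive boundaries (alternative decomposition, same cost).
def validate_work_pattern (pattern : List String) (shift_details : List (String × String)) (scheme : String) : Bool × List String :=
  let violations : List String := []
  if pattern.isEmpty then
    let violations := violations ++ ["❌ Pattern is empty - must contain at least one shift code"]
    (false, violations)
  else
    -- for code in pattern: running counter / running max
    let st := pattern.foldl (fun (s : Int × Int) code =>
      if code ≠ "O" then (s.1 + 1, max s.2 (s.1 + 1)) else (0, s.2)) (0, 0)
    let max_consecutive := st.2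
    if max_consecutive > 12 then
      let violations := violations ++ ["❌ Pattern has " ++ PySem.Int.toStr max_consecutive ++ " consecutive work days without any 'O' (off-day). Maximum allowed: 12. Add 'O' to break the sequence."]
      (false, violations)
    else
      (true, [])

-- ===== PORT B =====
-- Python max() over the gap generator; it is always nonempty here (positions has ≥ 2
-- elements), so the [] branch is unreachable
def pyMax1 (l : List Int) : Int :=
  match l with
  | [] => 0
  | g :: gs => gs.foldl max g

def validate_work_pattern_alt (pattern : List String) (shift_details : List (String × String)) (scheme : String) : Bool × List String :=
  let violations : List String := []
  if pattern.isEmpty then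
    let violations := violations ++ ["❌ Pattern is empty - must contain at least one shift code"]
    (false, violations)
  else
    let positions : List Int :=
      [(-1 : Int)] ++ ((PySem.List.enumerate pattern).filter (fun p => p.2 == "O")).map (fun p => p.1)
        ++ [(pattern.length : Int)]
    let gaps := (positions.zip positions.tail).map (fun p => p.2 - p.1 - 1)
    let max_consecutive := pyMax1 gaps
    if max_consecutive > 12 then
      let violations := violations ++ ["❌ Pattern has " ++ PySem.Int.toStr max_consecutive ++ " consecutive work days without any 'O' (off-day). Maximum allowed: 12. Add 'O' to break the sequence."]
      (false, violations)
    else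
      (true, [])

-- ===== PRECONDITION & SPEC =====
def Spec_validate_work_pattern (pattern : List String) (shift_details : List (String × String)) (scheme : String) (out : Bool × List String) : Prop := out = validate_work_pattern_alt pattern shift_details scheme
instance (pattern : List String) (shift_details : List (String × String)) (scheme : String) (out : Bool × List String) : Decidable (Spec_validate_work_pattern pattern shift_details scheme out) := by unfold Spec_validate_work_pattern; infer_instance

-- ===== CLAIM (what is proved, stated in full; the proofs are below) =====
def Claim_equal_validate_work_pattern : Prop := ∀ (pattern : List String) (shift_details : List (String × String)) (scheme : String), Dom_validate_work_pattern pattern shift_details scheme → Spec_validate_work_pattern pattern shift_details scheme (validate_work_pattern pattern shift_details scheme)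

-- ===== LEMMAS AND PROOFS =====

-- (p, m) = (length of the leading non-"O" run of l, max non-"O" run length in l)
def pvR (l : List String) : Int × Int :=
  match l with
  | [] => (0, 0)
  | c :: t =>
    let pm := pvR t
    if c ≠ "O" then (pm.1 + 1, max (pm.1 + 1) pm.2) else (0, pm.2)

-- "O" positions of l, as a structural recursion
def pvP (l : List String) : List Int :=
  match l with
  | [] => []
  | c :: t => (if c = "O" then [(0 : Int)] else []) ++ (pvP t).map (· + 1)

-- adjacent differences of a :: l (each minus 1)
def pvD (a : Int) (l : List Int) : List Int :=
  match l with
  | [] => []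
  | b :: t => (b - a - 1) :: pvD b t

-- max gap of the boundary list a :: ps ++ [n]
def pvGaps (a : Int) (ps : List Int) (n : Int) : Int :=
  match ps with
  | [] => n - a - 1
  | p :: pt => max (p - a - 1) (pvGaps p pt n)

theorem pvR_nonneg (l : List String) : 0 ≤ (pvR l).1 ∧ (pvR l).1 ≤ (pvR l).2 := by
  induction l with
  | nil => simp [pvR]
  | cons c t ih => simp only [pvR]; split <;> simp <;> omega

-- A-side scan characterisation
theorem pvA_scan (l : List String) : ∀ cur mx : Int, 0 ≤ cur → cur ≤ mx →
    (l.foldl (fun (s : Int × Int) code =>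
      if code ≠ "O" then (s.1 + 1, max s.2 (s.1 + 1)) else (0, s.2)) (cur, mx)).2
    = max mx (max (cur + (pvR l).1) (pvR l).2) := by
  induction l with
  | nil => intro cur mx h1 h2; simp [pvR]; omega
  | cons c t ih =>
    intro cur mx h1 h2
    have hr := pvR_nonneg t
    by_cases hc : c = "O"
    · rw [List.foldl_cons, show (if c ≠ "O" then (cur + 1, max mx (cur + 1)) else ((0:Int), mx)) = ((0:Int), mx) by simp [hc]]
      rw [ih 0 mx (le_refl 0) (by omega)]
      simp only [pvR, hc, ne_eq, not_true_eq_false, if_false]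
      omega
    · rw [List.foldl_cons, show (if c ≠ "O" then (cur + 1, max mx (cur + 1)) else ((0:Int), mx)) = (cur + 1, max mx (cur + 1)) by simp [hc]]
      rw [ih (cur + 1) (max mx (cur + 1)) (by omega) (by omega)]
      simp only [pvR, if_pos (by simpa using hc)]
      omega

-- B-side: enumerate/filter/map positions = pvP
theorem pvP_enum (l : List String) : ∀ s : Int,
    ((PySem.List.enumerate l s).filter (fun p => p.2 == "O")).map (fun p => p.1)
    = (pvP l).map (· + s) := by
  induction l with
  | nil => intro s; simp [PySem.List.enumerate_nil, pvP]
  | cons c t ih =>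
    intro s
    rw [PySem.List.enumerate_cons]
    by_cases hc : c = "O"
    · have hP : pvP (c :: t) = 0 :: (pvP t).map (· + 1) := by simp [pvP, hc]
      rw [List.filter_cons_of_pos (by simp [hc]), List.map_cons, ih (s + 1), hP,
        List.map_cons, List.map_map]
      congr 1
      · simp
      · apply List.map_congr_left
        intro x _
        simp only [Function.comp_apply]
        omega
    · have hP : pvP (c :: t) = (pvP t).map (· + 1) := by simp [pvP, hc]
      rw [List.filter_cons_of_neg (by simp [hc]), ih (s + 1), hP, List.map_map]
      apply List.map_congr_left
      intro x _
      simp only [Function.comp_apply]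
      omega

theorem pvD_zip (l : List Int) : ∀ a : Int,
    ((a :: l).zip l).map (fun p => p.2 - p.1 - 1) = pvD a l := by
  induction l with
  | nil => intro a; simp [pvD]
  | cons b t ih => intro a; simp [pvD, ih b]

theorem foldl_max_max (l : List Int) : ∀ x y : Int,
    l.foldl max (max x y) = max x (l.foldl max y) := by
  induction l with
  | nil => intro x y; simp
  | cons b t ih =>
    intro x y
    simp only [List.foldl_cons]
    rw [max_assoc, ih]

theorem pvD_ne_nil (pt : List Int) (p n : Int) : pvD p (pt ++ [n]) ≠ [] := by
  cases pt <;> simp [pvD]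

theorem pvD_gaps (ps : List Int) : ∀ a n : Int,
    pyMax1 (pvD a (ps ++ [n])) = pvGaps a ps n := by
  induction ps with
  | nil => intro a n; simp [pvD, pvGaps, pyMax1]
  | cons p pt ih =>
    intro a n
    rw [List.cons_append, show pvD a (p :: (pt ++ [n])) = (p - a - 1) :: pvD p (pt ++ [n]) from rfl]
    cases h : pvD p (pt ++ [n]) with
    | nil => exact absurd h (pvD_ne_nil pt p n)
    | cons g gs =>
      simp only [pyMax1, List.foldl_cons]
      rw [foldl_max_max gs (p - a - 1) g]
      have := ih p n
      rw [h] at this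
      simp only [pyMax1] at this
      rw [this]
      simp [pvGaps]

theorem pvGaps_shift1 (ps : List Int) : ∀ a n : Int,
    pvGaps a (ps.map (· + 1)) (n + 1) = pvGaps (a - 1) ps n := by
  induction ps with
  | nil => intro a n; simp [pvGaps]; omega
  | cons p pt ih =>
    intro a n
    simp only [List.map_cons, pvGaps]
    rw [ih (p + 1) n]
    congr 1
    · omega
    · congr 1; omega

theorem pvGaps_main (l : List String) : ∀ a : Int, 0 ≤ a →
    pvGaps (-a - 1) (pvP l) (l.length : Int) = max (a + (pvR l).1) (pvR l).2 := by
  induction l with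
  | nil => intro a ha; simp [pvP, pvR, pvGaps]; omega
  | cons c t ih =>
    intro a ha
    have hr := pvR_nonneg t
    have hlen : ((c :: t).length : Int) = (t.length : Int) + 1 := by
      simp [List.length_cons]
    by_cases hc : c = "O"
    · have hP : pvP (c :: t) = 0 :: (pvP t).map (· + 1) := by simp [pvP, hc]
      rw [hP, hlen]
      simp only [pvGaps]
      rw [pvGaps_shift1 (pvP t) 0 (t.length : Int)]
      rw [show (0 - 1 : Int) = -(0 : Int) - 1 by ring]
      rw [ih 0 (le_refl 0)]
      simp only [pvR, hc, ne_eq, not_true_eq_false, if_false]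
      omega
    · have hP : pvP (c :: t) = (pvP t).map (· + 1) := by simp [pvP, hc]
      rw [hP, hlen]
      rw [pvGaps_shift1 (pvP t) (-a - 1) (t.length : Int)]
      rw [show (-a - 1 - 1 : Int) = -(a + 1) - 1 by ring]
      rw [ih (a + 1) (by omega)]
      simp only [pvR, if_pos (by simpa using hc)]
      omega

theorem pv_same_max (pattern : List String) :
    (pattern.foldl (fun (s : Int × Int) code =>
      if code ≠ "O" then (s.1 + 1, max s.2 (s.1 + 1)) else (0, s.2)) ((0 : Int), (0 : Int))).2
    = pyMax1 ((([(-1 : Int)] ++ ((PySem.List.enumerate pattern).filter (fun p => p.2 == "O")).map (fun p => p.1) ++ [(pattern.length : Int)]).zip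
          ([(-1 : Int)] ++ ((PySem.List.enumerate pattern).filter (fun p => p.2 == "O")).map (fun p => p.1) ++ [(pattern.length : Int)]).tail).map
          (fun p => p.2 - p.1 - 1)) := by
  have hr := pvR_nonneg pattern
  rw [pvA_scan pattern 0 0 (le_refl 0) (le_refl 0)]
  have hp : ((PySem.List.enumerate pattern).filter (fun p => p.2 == "O")).map (fun p => p.1) = pvP pattern := by
    rw [pvP_enum pattern 0]; simp
  rw [hp]
  have hzip : (([(-1 : Int)] ++ pvP pattern ++ [(pattern.length : Int)]).zip
      (([(-1 : Int)] ++ pvP pattern ++ [(pattern.length : Int)]).tail)).map (fun p => p.2 - p.1 - 1)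
      = pvD (-1) (pvP pattern ++ [(pattern.length : Int)]) := by
    have h := pvD_zip (pvP pattern ++ [(pattern.length : Int)]) (-1)
    simpa using h
  rw [hzip, pvD_gaps (pvP pattern) (-1) (pattern.length : Int)]
  rw [show (-1 : Int) = -(0 : Int) - 1 by ring]
  rw [pvGaps_main pattern 0 (le_refl 0)]
  omega

-- ===== VERDICT (by name: the statement is the Claim_ definition above) =====
theorem validate_work_pattern_spec : Claim_equal_validate_work_pattern := by
  intro pattern shift_details scheme _
  unfold Spec_validate_work_pattern validate_work_pattern validate_work_pattern_alt
  by_cases h : pattern.isEmpty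
  · simp [h]
  · simp only [h, Bool.false_eq_true, if_false]
    rw [pv_same_max pattern]
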